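-- pv_equiv track=rewrite | github.com/lbnqq/TengXunYun | src/core/tools/enhanced_xingcheng_optimizer.py | _structure_text_response
-- ===== SOURCE A (Python) =====
-- from typing import Dict, Any, List, Optional
--
-- def _structure_text_response(text_response: str) -> Dict[str, Any]:
--     """结构化文本响应"""
--     # 简单的文本结构化处理
--     lines = text_response.split('\n')
--     structured_result = {}
--
--     current_section = None
--     for line in lines:
--         line = line.strip()
--         if not line:
--             continue
--
--         if line.startswith('1.') or line.startswith('2.') or line.startswith('3.'):
--             current_section = line.split('.')[1].strip()
--             structured_result[current_section] = []
--         elif current_section and line: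
--             structured_result[current_section].append(line)
--
--     return structured_result
-- ===== SOURCE B (Python) =====
-- def _structure_text_response(text_response: str):
--     # span/boundary version: find each header, assign its section the slice of
--     # lines up to the next header (instead of a running per-line accumulator)
--     lines = [s for s in (l.strip() for l in text_response.split('\n')) if s]
--
--     def is_header(l):
--         return l.startswith(('1.', '2.', '3.'))
--
--     n = len(lines)
--     i = 0
--     while i < n and not is_header(lines[i]):
--         i += 1
--     result = {}
--     while i < n:
--         name = lines[i].split('.')[1].strip()
--         j = i + 1
--         while j < n and not is_header(lines[j]):
--             j += 1
--         result[name] = lines[i + 1:j]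
--         i = j
--     return result
-- ===== Notes on version B (the rewrite author's own statement) =====
-- stated objective: alternative
-- what changed: Replaces A's single running-accumulator state machine (current section + per-line append) with header-boundary finding followed by slice-shaped grouping: skip to the first header, then for each header assign the whole slice of lines up to the next header at once.
-- outside the precondition, e.g. on _structure_text_response('1.\nhello'): A returns {'': []}, B returns {'': ['hello']}
import Mathlib
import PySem

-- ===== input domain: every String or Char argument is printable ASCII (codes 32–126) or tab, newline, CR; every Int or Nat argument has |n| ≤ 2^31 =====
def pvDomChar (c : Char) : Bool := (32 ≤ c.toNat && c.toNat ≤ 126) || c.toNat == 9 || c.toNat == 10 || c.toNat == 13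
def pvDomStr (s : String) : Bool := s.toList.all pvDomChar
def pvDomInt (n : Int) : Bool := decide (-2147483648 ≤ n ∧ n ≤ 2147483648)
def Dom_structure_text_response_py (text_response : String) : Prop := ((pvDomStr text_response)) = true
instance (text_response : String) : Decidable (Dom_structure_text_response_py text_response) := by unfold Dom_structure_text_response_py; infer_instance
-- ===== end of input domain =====

-- B replaces A's one-pass running-accumulator scan with header-boundary finding and
-- slice-shaped grouping (objective: alternative decomposition, not claimed faster).

-- text_response.split('\n'): sep "\n" ≠ "" so split? is always some; getD [] is exact
def pvLines (t : String) : List String := (PySem.Str.split? t "\n").getD []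

-- shared helpers (both Pythons test 'k.' prefixes and take split('.')[1].strip())
def pvIsHeader (l : String) : Bool :=
  PySem.Str.startswith l "1." || PySem.Str.startswith l "2." || PySem.Str.startswith l "3."

-- line.split('.')[1].strip(); index 1 always exists when pvIsHeader holds, so pyGetD is exact there
def pvSecName (l : String) : String :=
  PySem.Str.strip (PySem.List.pyGetD ((PySem.Str.split? l ".").getD []) 1 "")

-- ===== PORT A =====
-- loop body after the strip/empty-continue (the 'elif current_section and line' keeps
-- Python's truthiness tests: current_section not None via the match, ≠ '' and line ≠ '');
-- list.append on the existing entry is rendered as an in-place overwrite of that key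
def pvSimpleA (st : PySem.Dict String (List String) × Option String) (line : String) :
    PySem.Dict String (List String) × Option String :=
  if pvIsHeader line then
    let sec := pvSecName line
    (st.1.insert sec [], some sec)
  else
    match st.2 with
    | some sec =>
        if sec ≠ "" ∧ line ≠ "" then (st.1.insert sec (st.1.getD sec [] ++ [line]), st.2) else st
    | none => st

def pvStepA (st : PySem.Dict String (List String) × Option String) (l0 : String) :
    PySem.Dict String (List String) × Option String :=
  let line := PySem.Str.strip l0
  if line = "" then st else pvSimpleA st line

def structure_text_response_py (text_response : String) : List (String × List String) :=
  ((pvLines text_response).foldl pvStepA (PySem.Dict.empty, none)).1.items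

-- ===== PORT B =====
-- Source B: lines = stripped non-empty lines; skip to the first header; then for each header,
-- the section content is the slice of lines up to the next header (the inner while-scan
-- for the next header index j and the slice lines[i+1:j] are takeWhile/dropWhile here)
def pvAltLines (text_response : String) : List String :=
  ((pvLines text_response).map PySem.Str.strip).filter (fun s => s ≠ "")

def pvAltParse : List String → PySem.Dict String (List String) → PySem.Dict String (List String)
  | [], d => d
  | h :: t, d =>
      pvAltParse (t.dropWhile (fun x => !pvIsHeader x))
        (d.insert (pvSecName h) (t.takeWhile (fun x => !pvIsHeader x)))
termination_by ls _ => ls.length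
decreasing_by simpa using Nat.lt_succ_of_le (List.length_dropWhile_le _ _)

def structure_text_response_py_alt (text_response : String) : List (String × List String) :=
  let lines := pvAltLines text_response
  (pvAltParse (lines.dropWhile (fun x => !pvIsHeader x)) PySem.Dict.empty).items

-- ===== PRECONDITION & SPEC =====
-- an adjacent pair (empty-name header line, content line) among the stripped non-empty lines
def pvBadPair (a b : String) : Bool :=
  pvIsHeader a && pvSecName a == "" && !pvIsHeader b

def pvNoBad : List String → Bool
  | a :: b :: t => !pvBadPair a b && pvNoBad (b :: t)
  | _ => true

-- Pre_ excludes texts where a header line whose derived section name is empty is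
-- immediately followed by a non-header content line: there A's falsy
-- empty-string check silently drops that content while B attaches it to the empty-named
-- section — both are defensible for an unspecified corner.
def Pre_structure_text_response_py (text_response : String) : Prop :=
  pvNoBad (((pvLines text_response).map PySem.Str.strip).filter (fun s => s ≠ "")) = true

instance (text_response : String) : Decidable (Pre_structure_text_response_py text_response) := by
  unfold Pre_structure_text_response_py; infer_instance

def pvWitness_structure_text_response_py : String := "1. intro\nhello\n2. body\nworld"

def Spec_structure_text_response_py (text_response : String) (out : List (String × List String)) : Prop :=
  out = structure_text_response_py_alt text_response

instance (text_response : String) (out : List (String × List String)) :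
    Decidable (Spec_structure_text_response_py text_response out) := by
  unfold Spec_structure_text_response_py; infer_instance

-- ===== CLAIM (what is proved, stated in full; the proofs are below) =====
def Claim_equal_structure_text_response_py : Prop :=
  ∀ (text_response : String), Dom_structure_text_response_py text_response →
    Pre_structure_text_response_py text_response →
    Spec_structure_text_response_py text_response (structure_text_response_py text_response)

-- ===== LEMMAS AND PROOFS =====

-- A's fold over the raw lines equals the simple fold over the stripped non-empty lines
lemma pv_fold_bridge (raw : List String) (st : PySem.Dict String (List String) × Option String) :
    raw.foldl pvStepA st
      = ((raw.map PySem.Str.strip).filter (fun s => s ≠ "")).foldl pvSimpleA st := by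
  induction raw generalizing st with
  | nil => rfl
  | cons l t ih =>
      by_cases h : PySem.Str.strip l = "" <;>
        simp [List.foldl_cons, pvStepA, h, ih]

-- with no current section, non-header lines are skipped
lemma pv_skip (pre : List String) (h : ∀ x ∈ pre, pvIsHeader x = false)
    (d : PySem.Dict String (List String)) :
    pre.foldl pvSimpleA (d, none) = (d, none) := by
  induction pre with
  | nil => rfl
  | cons x t ih =>
      simp only [List.foldl_cons, pvSimpleA, h x (by simp)]
      exact ih (fun y hy => h y (by simp [hy]))

-- the body fold appends the whole body to the current section's entry
lemma pv_body (body : List String)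
    (hb : ∀ x ∈ body, pvIsHeader x = false ∧ x ≠ "")
    (d : PySem.Dict String (List String)) (s : String) (hs : s ≠ "") (v : List String) :
    body.foldl pvSimpleA (d.insert s v, some s) = (d.insert s (v ++ body), some s) := by
  induction body generalizing v with
  | nil => simp
  | cons x t ih =>
      obtain ⟨hx, hx'⟩ := hb x (by simp)
      have hstep : pvSimpleA (d.insert s v, some s) x = (d.insert s (v ++ [x]), some s) := by
        simp only [pvSimpleA, hx, Bool.false_eq_true, if_false]
        rw [if_pos ⟨hs, hx'⟩]
        simp [PySem.Dict.getD_insert_self, PySem.Dict.insert_insert_self]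
      rw [List.foldl_cons, hstep, ih (fun y hy => hb y (by simp [hy])) (v ++ [x])]
      simp

lemma pv_dropWhile_head (p : String → Bool) (l : List String) :
    l.dropWhile p = [] ∨ ∃ h t, l.dropWhile p = h :: t ∧ p h = false := by
  induction l with
  | nil => exact Or.inl rfl
  | cons x t ih =>
      by_cases h : p x
      · simpa [h] using ih
      · exact Or.inr ⟨x, t, by simp [h], by simpa using h⟩

lemma pv_noBad_tail (a : String) (l : List String) (h : pvNoBad (a :: l) = true) :
    pvNoBad l = true := by
  cases l with
  | nil => rfl
  | cons b t =>
      have h' : pvBadPair a b = false ∧ pvNoBad (b :: t) = true := by simpa [pvNoBad] using h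
      exact h'.2

lemma pv_noBad_dropWhile (p : String → Bool) (l : List String) (h : pvNoBad l = true) :
    pvNoBad (l.dropWhile p) = true := by
  induction l with
  | nil => simpa using h
  | cons a t ih =>
      by_cases ha : p a
      · simpa [List.dropWhile_cons, ha] using ih (pv_noBad_tail a t h)
      · simpa [List.dropWhile_cons, ha] using h

-- main correspondence, on a header-headed (or empty) list of stripped non-empty lines
-- with no (empty-name header, content line) adjacency
lemma pv_main : ∀ (n : Nat) (ls : List String), ls.length ≤ n →
    (∀ x ∈ ls, x ≠ "") →
    pvNoBad ls = true →
    (ls = [] ∨ ∃ h t, ls = h :: t ∧ pvIsHeader h = true) →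
    ∀ (d : PySem.Dict String (List String)) (cur : Option String),
      (ls.foldl pvSimpleA (d, cur)).1 = pvAltParse ls d := by
  intro n
  induction n with
  | zero =>
      intro ls hlen _ _ _ d cur
      have : ls = [] := List.length_eq_zero_iff.mp (Nat.le_zero.mp hlen)
      subst this; simp [pvAltParse]
  | succ n ih =>
      intro ls hlen hne hnb hshape d cur
      rcases hshape with rfl | ⟨h, t, rfl, hh⟩
      · simp [pvAltParse]
      · set p : String → Bool := fun x => !pvIsHeader x with hp
        have step1 : (h :: t).foldl pvSimpleA (d, cur)
            = t.foldl pvSimpleA (d.insert (pvSecName h) [], some (pvSecName h)) := by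
          simp [List.foldl_cons, pvSimpleA, hh]
        have ht : t.length ≤ n := by simpa using Nat.le_of_succ_le_succ (by simpa using hlen)
        have hnet : ∀ x ∈ t, x ≠ "" := fun x hx => hne x (by simp [hx])
        have hnbt : pvNoBad t = true := pv_noBad_tail h t hnb
        by_cases hname : pvSecName h = ""
        · -- empty section name: the following line (if any) must be a header,
          -- so the body slice is empty and both sides just recurse on t
          cases t with
          | nil => simp [step1, pvAltParse]
          | cons b t' =>
              have hb : pvIsHeader b = true := by
                by_contra hbf
                have : pvBadPair h b = true := by
                  simp [pvBadPair, hh, hname, Bool.not_eq_true _ ▸ hbf]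
                simp [pvNoBad, this] at hnb
              rw [step1, ih (b :: t') ht hnet hnbt (Or.inr ⟨b, t', rfl, hb⟩)
                (d.insert (pvSecName h) []) (some (pvSecName h))]
              conv_rhs => rw [pvAltParse]
              simp [hb]
        · have hsplit := List.takeWhile_append_dropWhile (p := p) (l := t)
          have hbody : ∀ x ∈ t.takeWhile p, pvIsHeader x = false ∧ x ≠ "" := by
            intro x hx
            have hxt : x ∈ t := (List.takeWhile_sublist p).subset hx
            have := List.mem_takeWhile_imp hx
            exact ⟨by simpa [hp] using this, hne x (by simp [hxt])⟩
          have step2 : t.foldl pvSimpleA (d.insert (pvSecName h) [], some (pvSecName h))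
              = (t.dropWhile p).foldl pvSimpleA
                  (d.insert (pvSecName h) (t.takeWhile p), some (pvSecName h)) := by
            conv_lhs => rw [← hsplit]
            rw [List.foldl_append, pv_body (t.takeWhile p) hbody d (pvSecName h) hname []]
            simp
          have hrest_sub : ∀ x ∈ t.dropWhile p, x ∈ t := fun x hx =>
            (List.dropWhile_sublist p).subset hx
          have hlen' : (t.dropWhile p).length ≤ n := by
            have := List.length_dropWhile_le p t
            omega
          have hshape' : t.dropWhile p = [] ∨
              ∃ h' t', t.dropWhile p = h' :: t' ∧ pvIsHeader h' = true := by
            rcases pv_dropWhile_head p t with h0 | ⟨h', t', heq, hph⟩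
            · exact Or.inl h0
            · exact Or.inr ⟨h', t', heq, by simpa [hp] using hph⟩
          rw [step1, step2,
            ih (t.dropWhile p) hlen'
              (fun x hx => hnet x (hrest_sub x hx))
              (pv_noBad_dropWhile p t hnbt)
              hshape' (d.insert (pvSecName h) (t.takeWhile p)) (some (pvSecName h))]
          conv_rhs => rw [pvAltParse]

-- ===== VERDICT (by name: the statement is the Claim_ definition above) =====
theorem structure_text_response_py_spec : Claim_equal_structure_text_response_py := by
  intro t _hdom hpre
  unfold Spec_structure_text_response_py
  unfold structure_text_response_py structure_text_response_py_alt
  simp only [pvAltLines]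
  rw [pv_fold_bridge]
  set L : List String := ((pvLines t).map PySem.Str.strip).filter (fun s => s ≠ "") with hL
  set p : String → Bool := fun x => !pvIsHeader x with hp
  have hLmem : ∀ x ∈ L, x ≠ "" := by
    intro x hx
    have := List.of_mem_filter hx
    simpa using this
  have hLnb : pvNoBad L = true := hpre
  have hsplit := List.takeWhile_append_dropWhile (p := p) (l := L)
  conv_lhs => rw [← hsplit]
  rw [List.foldl_append]
  have hpre' : ∀ x ∈ L.takeWhile p, pvIsHeader x = false := by
    intro x hx
    have := List.mem_takeWhile_imp hx
    simpa [hp] using this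
  rw [pv_skip (L.takeWhile p) hpre' PySem.Dict.empty]
  have hshape : L.dropWhile p = [] ∨
      ∃ h' t', L.dropWhile p = h' :: t' ∧ pvIsHeader h' = true := by
    rcases pv_dropWhile_head p L with h0 | ⟨h', t', heq, hph⟩
    · exact Or.inl h0
    · exact Or.inr ⟨h', t', heq, by simpa [hp] using hph⟩
  exact congrArg PySem.Dict.items (pv_main (L.dropWhile p).length (L.dropWhile p) le_rfl
    (fun x hx => hLmem x ((List.dropWhile_sublist p).subset hx))
    (pv_noBad_dropWhile p L hLnb)
    hshape PySem.Dict.empty none)
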